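-- pv_equiv track=rewrite | github.com/unicome37/poset_phase | f2_turnon_margin_runner.py | _find_blocks_in_order
-- ===== SOURCE A (Python) =====
-- def _find_blocks_in_order(n_grid: list[int], hit_map: dict[int, bool], min_len: int) -> list[list[int]]:
--     blocks: list[list[int]] = []
--     cur: list[int] = []
--     for n in n_grid:
--         if hit_map.get(n, False):
--             cur.append(n)
--         else:
--             if len(cur) >= min_len:
--                 blocks.append(cur[:])
--             cur = []
--     if len(cur) >= min_len:
--         blocks.append(cur[:])
--     return blocks
-- ===== SOURCE B (Python) =====
-- def _find_blocks_in_order(n_grid: list[int], hit_map: dict[int, bool], min_len: int) -> list[list[int]]: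
--     # Two-pointer run scanner: find each maximal hit run [i:j] directly and
--     # slice it out, instead of accumulating elements one by one and flushing.
--     blocks: list[list[int]] = []
--     i, size = 0, len(n_grid)
--     while i < size:
--         if hit_map.get(n_grid[i], False):
--             j = i + 1
--             while j < size and hit_map.get(n_grid[j], False):
--                 j += 1
--             if j - i >= min_len:
--                 blocks.append(n_grid[i:j])
--             i = j
--         else:
--             i += 1
--     return blocks
-- ===== Notes on version B (the rewrite author's own statement) =====
-- stated objective: alternative
-- what changed: Replaces A's accumulate-and-flush loop (growing a cur list element by element and flushing it at each non-hit) with a two-pointer run scanner that finds each maximal hit run's end index and slices the block out of n_grid directly.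
-- outside the precondition, e.g. on _find_blocks_in_order([1], {}, 0): A returns [[], []], B returns []
import Mathlib
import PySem

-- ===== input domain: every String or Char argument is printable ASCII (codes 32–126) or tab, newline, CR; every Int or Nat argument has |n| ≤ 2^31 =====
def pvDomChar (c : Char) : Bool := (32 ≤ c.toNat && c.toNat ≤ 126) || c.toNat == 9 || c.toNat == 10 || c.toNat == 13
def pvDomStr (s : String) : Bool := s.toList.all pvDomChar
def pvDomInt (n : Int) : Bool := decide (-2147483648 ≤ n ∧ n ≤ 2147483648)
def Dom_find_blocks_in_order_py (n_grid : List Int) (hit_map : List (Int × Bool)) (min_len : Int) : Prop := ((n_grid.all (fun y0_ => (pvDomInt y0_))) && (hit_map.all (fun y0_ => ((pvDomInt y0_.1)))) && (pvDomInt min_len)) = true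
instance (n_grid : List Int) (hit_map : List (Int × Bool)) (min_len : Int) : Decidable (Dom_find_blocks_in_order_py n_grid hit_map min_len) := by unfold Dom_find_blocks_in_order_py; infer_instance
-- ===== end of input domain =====

-- B replaces A's accumulate-and-flush loop by a two-pointer maximal-run scanner that slices each
-- qualifying hit run out of n_grid directly (alternative decomposition, same asymptotic cost);
-- Pre_ restricts to the natural domain min_len ≥ 1 (for min_len ≤ 0 A emits empty blocks).


-- hit_map.get(n, False) (first-match association-list lookup), shared by both ports
def pvHit (hit_map : List (Int × Bool)) (n : Int) : Bool :=
  (PySem.Dict.mk hit_map).getD n false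

-- ===== PORT A =====
def find_blocks_in_order_py (n_grid : List Int) (hit_map : List (Int × Bool)) (min_len : Int) : List (List Int) :=
  let st := n_grid.foldl
    (fun (st : List (List Int) × List Int) n =>
      if pvHit hit_map n then (st.1, st.2 ++ [n])
      else ((if min_len ≤ (st.2.length : Int) then st.1 ++ [st.2] else st.1), []))
    ([], [])
  if min_len ≤ (st.2.length : Int) then st.1 ++ [st.2] else st.1

-- ===== PORT B =====
-- inner while loop: advance j to the end of the current hit run
def pvRunEnd (hit_map : List (Int × Bool)) (grid : List Int) (j : Nat) : Nat :=
  if h : j < grid.length ∧ pvHit hit_map (grid.getD j 0) then pvRunEnd hit_map grid (j + 1) else j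
termination_by grid.length - j
decreasing_by omega

theorem pvRunEnd_ge (hit_map : List (Int × Bool)) (grid : List Int) (j : Nat) :
    j ≤ pvRunEnd hit_map grid j := by
  rw [pvRunEnd]
  split
  · exact le_trans (by omega) (pvRunEnd_ge hit_map grid (j + 1))
  · exact le_refl j
termination_by grid.length - j
decreasing_by omega

-- outer while loop
def pvBloop (hit_map : List (Int × Bool)) (min_len : Int) (grid : List Int)
    (blocks : List (List Int)) (i : Nat) : List (List Int) :=
  if h : i < grid.length then
    if pvHit hit_map (grid.getD i 0) then
      let j := pvRunEnd hit_map grid (i + 1)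
      pvBloop hit_map min_len grid
        (if min_len ≤ ((j - i : Nat) : Int)
          then blocks ++ [PySem.List.slice grid (some (i : Int)) (some (j : Int))]
          else blocks) j
    else pvBloop hit_map min_len grid blocks (i + 1)
  else blocks
termination_by grid.length - i
decreasing_by
  · have := pvRunEnd_ge hit_map grid (i + 1); omega
  · omega

def find_blocks_in_order_py_alt (n_grid : List Int) (hit_map : List (Int × Bool)) (min_len : Int) : List (List Int) :=
  pvBloop hit_map min_len n_grid [] 0

-- ===== PRECONDITION & SPEC =====
-- Pre_ restricts to the natural domain min_len ≥ 1: for min_len ≤ 0 (a non-positive minimum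
-- block length) A appends an empty block at every non-hit element and at the end, an artefact
-- no caller would specify, while B reports only the actual hit runs.
def Pre_find_blocks_in_order_py (n_grid : List Int) (hit_map : List (Int × Bool)) (min_len : Int) : Prop :=
  1 ≤ min_len
instance (n_grid : List Int) (hit_map : List (Int × Bool)) (min_len : Int) : Decidable (Pre_find_blocks_in_order_py n_grid hit_map min_len) := by unfold Pre_find_blocks_in_order_py; infer_instance

def pvWitness_find_blocks_in_order_py : List Int × (List (Int × Bool)) × Int :=
  ([1, 2, 3], [(1, true), (2, true)], 2)

def Spec_find_blocks_in_order_py (n_grid : List Int) (hit_map : List (Int × Bool)) (min_len : Int) (out : List (List Int)) : Prop := out = find_blocks_in_order_py_alt n_grid hit_map min_len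
instance (n_grid : List Int) (hit_map : List (Int × Bool)) (min_len : Int) (out : List (List Int)) : Decidable (Spec_find_blocks_in_order_py n_grid hit_map min_len out) := by unfold Spec_find_blocks_in_order_py; infer_instance

-- ===== CLAIM (what is proved, stated in full; the proofs are below) =====
def Claim_equal_find_blocks_in_order_py : Prop := ∀ (n_grid : List Int) (hit_map : List (Int × Bool)) (min_len : Int), Dom_find_blocks_in_order_py n_grid hit_map min_len → Pre_find_blocks_in_order_py n_grid hit_map min_len → Spec_find_blocks_in_order_py n_grid hit_map min_len (find_blocks_in_order_py n_grid hit_map min_len)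

-- ===== LEMMAS AND PROOFS =====

-- common reference function: the list of maximal f-runs of length ≥ m, in order
def pvBrec (f : Int → Bool) (m : Int) : List Int → List (List Int)
  | [] => []
  | n :: rest =>
    if f n then
      (if m ≤ ((n :: rest.takeWhile f).length : Int) then [n :: rest.takeWhile f] else [])
        ++ pvBrec f m (rest.dropWhile f)
    else pvBrec f m rest
termination_by l => l.length
decreasing_by
  · have := List.length_dropWhile_le (p := f) (l := rest); simp; omega
  · simp

theorem pvBrec_cons_pos (f : Int → Bool) (m : Int) (n : Int) (rest : List Int) (h : f n = true) :
    pvBrec f m (n :: rest) =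
      (if m ≤ ((n :: rest.takeWhile f).length : Int) then [n :: rest.takeWhile f] else [])
        ++ pvBrec f m (rest.dropWhile f) := by
  rw [pvBrec, h]; simp

theorem pvBrec_cons_neg (f : Int → Bool) (m : Int) (n : Int) (rest : List Int) (h : f n = false) :
    pvBrec f m (n :: rest) = pvBrec f m rest := by
  rw [pvBrec, h]; simp

theorem pvBrec_absorb (f : Int → Bool) (m : Int) (hm : 1 ≤ m) (l : List Int) :
    (if m ≤ ((l.takeWhile f).length : Int) then [l.takeWhile f] else [])
      ++ pvBrec f m (l.dropWhile f) = pvBrec f m l := by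
  cases l with
  | nil => simp [pvBrec]; omega
  | cons n rest =>
    cases hf : f n with
    | true =>
      rw [pvBrec_cons_pos f m n rest hf, List.takeWhile_cons_of_pos hf,
        List.dropWhile_cons_of_pos hf]
    | false =>
      rw [List.takeWhile_cons_of_neg (by simp [hf]), List.dropWhile_cons_of_neg (by simp [hf]),
        pvBrec_cons_neg f m n rest hf]
      simp
      omega

theorem pvA_char (f : Int → Bool) (m : Int) (hm : 1 ≤ m) :
    ∀ (l : List Int) (blocks : List (List Int)) (cur : List Int),
    (let st := l.foldl
        (fun (st : List (List Int) × List Int) n =>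
          if f n then (st.1, st.2 ++ [n])
          else ((if m ≤ (st.2.length : Int) then st.1 ++ [st.2] else st.1), []))
        (blocks, cur);
      if m ≤ (st.2.length : Int) then st.1 ++ [st.2] else st.1)
    = blocks ++ ((if m ≤ ((cur ++ l.takeWhile f).length : Int) then [cur ++ l.takeWhile f] else [])
        ++ pvBrec f m (l.dropWhile f)) := by
  intro l
  induction l with
  | nil => intro blocks cur; simp [pvBrec]; split <;> simp
  | cons n rest ih =>
    intro blocks cur
    cases hf : f n with
    | true =>
      simp only [List.foldl_cons, hf, if_true, List.takeWhile_cons_of_pos hf,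
        List.dropWhile_cons_of_pos hf]
      have := ih blocks (cur ++ [n])
      simp only [this]
      simp
    | false =>
      simp only [List.foldl_cons, hf, Bool.false_eq_true, if_false,
        List.takeWhile_cons_of_neg (by simp [hf] : ¬ f n = true),
        List.dropWhile_cons_of_neg (by simp [hf] : ¬ f n = true)]
      have := ih (if m ≤ (cur.length : Int) then blocks ++ [cur] else blocks) []
      simp only [this, List.nil_append]
      rw [pvBrec_absorb f m hm rest, ← pvBrec_cons_neg f m n rest hf]
      simp only [List.append_nil]
      split <;> simp

-- take/drop of the takeWhile length
theorem pvTake_takeWhile (f : Int → Bool) (l : List Int) :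
    l.take (l.takeWhile f).length = l.takeWhile f := by
  induction l with
  | nil => simp
  | cons n rest ih =>
    cases hf : f n with
    | true => simp [List.takeWhile_cons, hf, ih]
    | false => simp [List.takeWhile_cons, hf]

theorem pvDrop_takeWhile (f : Int → Bool) (l : List Int) :
    l.drop (l.takeWhile f).length = l.dropWhile f := by
  induction l with
  | nil => simp
  | cons n rest ih =>
    cases hf : f n with
    | true => simp [List.takeWhile_cons, List.dropWhile_cons, hf, ih]
    | false => simp [List.takeWhile_cons, List.dropWhile_cons, hf]

theorem pvRunEnd_eq (hit_map : List (Int × Bool)) (grid : List Int) (j : Nat) :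
    pvRunEnd hit_map grid j = j + ((grid.drop j).takeWhile (pvHit hit_map)).length := by
  rw [pvRunEnd]
  split
  · next h =>
    obtain ⟨hlt, hhit⟩ := h
    rw [List.getD_eq_getElem _ _ hlt] at hhit
    rw [pvRunEnd_eq hit_map grid (j + 1), List.drop_eq_getElem_cons hlt,
      List.takeWhile_cons_of_pos hhit, List.length_cons]
    omega
  · next h =>
    rcases Nat.lt_or_ge j grid.length with hlt | hge
    · have hhit : ¬ pvHit hit_map (grid.getD j 0) = true := fun hh => h ⟨hlt, hh⟩
      rw [List.getD_eq_getElem _ _ hlt] at hhit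
      rw [List.drop_eq_getElem_cons hlt, List.takeWhile_cons_of_neg hhit]
      simp
    · rw [List.drop_eq_nil_of_le hge]; simp
termination_by grid.length - j
decreasing_by omega

theorem pvBloop_eq (hit_map : List (Int × Bool)) (m : Int) (grid : List Int)
    (blocks : List (List Int)) (i : Nat) :
    pvBloop hit_map m grid blocks i = blocks ++ pvBrec (pvHit hit_map) m (grid.drop i) := by
  rw [pvBloop]
  split
  · next hlt =>
    rw [List.getD_eq_getElem _ _ hlt]
    split
    · next hhit =>
      have hrun := pvRunEnd_eq hit_map grid (i + 1)
      have hge := pvRunEnd_ge hit_map grid (i + 1)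
      rw [pvBloop_eq hit_map m grid _ (pvRunEnd hit_map grid (i + 1))]
      have hdropj : grid.drop (pvRunEnd hit_map grid (i + 1))
          = (grid.drop (i + 1)).dropWhile (pvHit hit_map) := by
        rw [hrun, ← pvDrop_takeWhile (pvHit hit_map) (grid.drop (i + 1)), List.drop_drop]
      have hslice : PySem.List.slice grid (some (i : Int)) (some ((pvRunEnd hit_map grid (i + 1) : Nat) : Int))
          = grid[i] :: (grid.drop (i + 1)).takeWhile (pvHit hit_map) := by
        rw [PySem.List.slice_natCast, List.drop_eq_getElem_cons hlt]
        have : pvRunEnd hit_map grid (i + 1) - i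
            = ((grid.drop (i + 1)).takeWhile (pvHit hit_map)).length + 1 := by omega
        rw [this, List.take_succ_cons, pvTake_takeWhile]
      have hlen : ((pvRunEnd hit_map grid (i + 1) - i : Nat) : Int)
          = ((grid[i] :: (grid.drop (i + 1)).takeWhile (pvHit hit_map)).length : Int) := by
        rw [List.length_cons]; omega
      rw [hdropj, hslice, hlen]
      rw [List.drop_eq_getElem_cons hlt, pvBrec_cons_pos _ _ _ _ hhit]
      split <;> simp
    · next hhit =>
      rw [pvBloop_eq hit_map m grid blocks (i + 1)]
      rw [List.drop_eq_getElem_cons hlt, pvBrec_cons_neg _ _ _ _ (by simpa using hhit)]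
  · next hge =>
    rw [List.drop_eq_nil_of_le (by omega)]
    simp [pvBrec]
termination_by grid.length - i
decreasing_by
  · have := pvRunEnd_ge hit_map grid (i + 1); omega
  · omega

-- ===== VERDICT (by name: the statement is the Claim_ definition above) =====
theorem find_blocks_in_order_py_spec : Claim_equal_find_blocks_in_order_py := by
  intro n_grid hit_map min_len _ hpre
  unfold Spec_find_blocks_in_order_py find_blocks_in_order_py find_blocks_in_order_py_alt
  rw [pvBloop_eq hit_map min_len n_grid [] 0]
  simp only [List.drop_zero, List.nil_append]
  have := pvA_char (pvHit hit_map) min_len hpre n_grid [] []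
  simp only [List.nil_append] at this
  rw [this]
  exact pvBrec_absorb (pvHit hit_map) min_len hpre n_grid
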